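-- pv_equiv track=rewrite | github.com/SL1C3D-L4BS/cold-coffee-labs | tools/ambientcg_sync/sync.py | pick_2k_jpg_url
-- ===== SOURCE A (Python) =====
-- ATTR_2K_JPG = "2K-JPG"
--
-- def pick_2k_jpg_url(downloads: list) -> str | None:
--     for d in downloads:
--         if d.get("attributes") == ATTR_2K_JPG and d.get("url"):
--             return d["url"]
--     for d in downloads:
--         a = d.get("attributes", "")
--         if "2K" in a and "JPG" in a and d.get("url"):
--             return d["url"]
--     return None
-- ===== SOURCE B (Python) =====
-- ATTR_2K_JPG = "2K-JPG"
--
-- def pick_2k_jpg_url(downloads: list) -> str | None: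
--     fuzzy = None
--     for d in downloads:
--         a = d.get("attributes", "")
--         url = d.get("url")
--         if a == ATTR_2K_JPG and url:
--             return url
--         if fuzzy is None and "2K" in a and "JPG" in a and url:
--             fuzzy = url
--     return fuzzy
-- ===== Notes on version B (the rewrite author's own statement) =====
-- stated objective: simpler
-- what changed: Replaces A's two sequential scans with a single pass that returns an exact '2K-JPG' match on sight and remembers the first fuzzy ('2K' and 'JPG' substring) match in one pending variable, returned only if no exact match exists.
import Mathlib
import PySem

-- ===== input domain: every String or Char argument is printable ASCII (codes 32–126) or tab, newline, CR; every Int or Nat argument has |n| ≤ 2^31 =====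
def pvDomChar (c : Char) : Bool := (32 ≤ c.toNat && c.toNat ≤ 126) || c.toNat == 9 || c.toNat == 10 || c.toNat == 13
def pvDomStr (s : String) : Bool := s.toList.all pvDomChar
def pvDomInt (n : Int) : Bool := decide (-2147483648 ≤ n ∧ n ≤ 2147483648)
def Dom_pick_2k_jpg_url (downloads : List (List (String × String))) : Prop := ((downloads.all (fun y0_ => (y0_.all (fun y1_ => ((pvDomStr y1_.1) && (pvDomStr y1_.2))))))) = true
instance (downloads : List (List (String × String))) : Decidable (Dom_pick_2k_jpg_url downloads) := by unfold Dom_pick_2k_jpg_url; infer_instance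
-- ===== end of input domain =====

-- B replaces A's two scans by one pass keeping a pending fuzzy match; objective: simpler.

-- ===== PORT A =====
-- d.get("url") is truthy iff the key is present with a non-empty value
def pvTruthy (o : Option String) : Bool := o.getD "" != ""

-- A's first loop: first download whose attributes equal "2K-JPG" with a truthy url
def pickExactA : List (List (String × String)) → Option String
  | [] => none
  | d :: rest =>
    if (d.lookup "attributes" == some "2K-JPG") && pvTruthy (d.lookup "url") then
      d.lookup "url"
    else pickExactA rest

-- A's second loop: first download whose attributes contain "2K" and "JPG" with a truthy url
def pickFuzzyA : List (List (String × String)) → Option String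
  | [] => none
  | d :: rest =>
    let a := (d.lookup "attributes").getD ""
    if PySem.Str.isIn "2K" a && PySem.Str.isIn "JPG" a && pvTruthy (d.lookup "url") then
      d.lookup "url"
    else pickFuzzyA rest

def pick_2k_jpg_url (downloads : List (List (String × String))) : Option String :=
  match pickExactA downloads with
  | some u => some u
  | none => pickFuzzyA downloads

-- ===== PORT B =====
-- single pass with a pending `fuzzy` candidate
def pickLoopB : List (List (String × String)) → Option String → Option String
  | [], fuzzy => fuzzy
  | d :: rest, fuzzy =>
    let a := (d.lookup "attributes").getD ""
    let url := d.lookup "url"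
    if (a == "2K-JPG") && (url.getD "" != "") then url
    else
      let fuzzy' := if fuzzy.isNone && PySem.Str.isIn "2K" a && PySem.Str.isIn "JPG" a
                       && (url.getD "" != "") then url else fuzzy
      pickLoopB rest fuzzy'

def pick_2k_jpg_url_alt (downloads : List (List (String × String))) : Option String :=
  pickLoopB downloads none

-- ===== PRECONDITION & SPEC =====
def Spec_pick_2k_jpg_url (downloads : List (List (String × String))) (out : Option String) : Prop := out = pick_2k_jpg_url_alt downloads
instance (downloads : List (List (String × String))) (out : Option String) : Decidable (Spec_pick_2k_jpg_url downloads out) := by unfold Spec_pick_2k_jpg_url; infer_instance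

-- ===== CLAIM (what is proved, stated in full; the proofs are below) =====
def Claim_equal_pick_2k_jpg_url : Prop := ∀ (downloads : List (List (String × String))), Dom_pick_2k_jpg_url downloads → Spec_pick_2k_jpg_url downloads (pick_2k_jpg_url downloads)

-- ===== LEMMAS AND PROOFS =====

-- A compares the raw Option, B the ""-defaulted value; they agree because "" ≠ "2K-JPG"
theorem exactCond_eq (o : Option String) :
    ((o.getD "" == "2K-JPG") : Bool) = (o == some "2K-JPG") := by
  cases o with
  | none => decide
  | some s => simp

theorem truthy_some {o : Option String} (h : (o.getD "" != "") = true) :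
    ∃ u, o = some u := by
  cases o with
  | none => simp at h
  | some u => exact ⟨u, rfl⟩

-- B's loop computes: exact match anywhere, else the pending fuzzy, else A's fuzzy scan
theorem pickLoopB_eq (ds : List (List (String × String))) (fuzzy : Option String) :
    pickLoopB ds fuzzy = (pickExactA ds).or (fuzzy.or (pickFuzzyA ds)) := by
  induction ds generalizing fuzzy with
  | nil => cases fuzzy <;> simp [pickLoopB, pickExactA, pickFuzzyA]
  | cons d rest ih =>
    simp only [pickLoopB, pickExactA, pickFuzzyA]
    rw [exactCond_eq]
    by_cases hex : ((d.lookup "attributes" == some "2K-JPG") && pvTruthy (d.lookup "url")) = true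
    · rw [if_pos hex, if_pos]
      · obtain ⟨u, hu⟩ := truthy_some (by simpa [pvTruthy] using (Bool.and_elim_right hex))
        simp [hu]
      · simpa [pvTruthy] using hex
    · rw [if_neg hex, if_neg (by simpa [pvTruthy] using hex), ih]
      by_cases hf : (PySem.Str.isIn "2K" ((d.lookup "attributes").getD "") &&
          PySem.Str.isIn "JPG" ((d.lookup "attributes").getD "") &&
          pvTruthy (d.lookup "url")) = true
      · rw [if_pos hf]
        obtain ⟨u, hu⟩ := truthy_some (by simpa [pvTruthy] using (Bool.and_elim_right hf))
        have hc : (PySem.Str.isIn "2K" ((d.lookup "attributes").getD "") &&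
            PySem.Str.isIn "JPG" ((d.lookup "attributes").getD "") &&
            (Option.getD (d.lookup "url") "" != "")) = true := by
          simpa [pvTruthy] using hf
        cases fuzzy with
        | none =>
          simp only [Option.isNone_none, Bool.true_and]
          rw [if_pos hc, hu]
          simp
        | some f =>
          simp only [Option.isNone_some, Bool.false_and]
          rw [if_neg (by simp), hu]
          simp
      · rw [if_neg hf]
        have : (fuzzy.isNone && PySem.Str.isIn "2K" ((d.lookup "attributes").getD "") &&
            PySem.Str.isIn "JPG" ((d.lookup "attributes").getD "") &&
            (Option.getD (d.lookup "url") "" != "")) = false := by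
          cases hz : fuzzy.isNone <;> simp_all [pvTruthy, Bool.and_assoc]
        rw [this]
        simp

-- ===== VERDICT (by name: the statement is the Claim_ definition above) =====
theorem pick_2k_jpg_url_spec : Claim_equal_pick_2k_jpg_url := by
  intro downloads _
  unfold Spec_pick_2k_jpg_url pick_2k_jpg_url pick_2k_jpg_url_alt
  rw [pickLoopB_eq]
  cases h : pickExactA downloads <;> simp
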